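-- pv_equiv track=rewrite | github.com/mark1ry/AoC-25 | day_01/password.py | calculate_password_1
-- ===== SOURCE A (Python) =====
-- def calculate_password_1(instructions: list) -> int:
--
--     safe_value = 50
--     password = 0
--     for element in instructions:
--         safe_value += element
--         while safe_value<0:
--             safe_value += 100
--         while safe_value>99:
--             safe_value -= 100
--         if safe_value==0:
--             password+=1
--
--     return password
-- ===== SOURCE B (Python) =====
-- def calculate_password_1(instructions: list) -> int:
--     # Two passes: build the list of running sums (seeded with 50),
--     # then count those divisible by 100 with a single modulo.
--     sums = [50]
--     s = 50
--     for e in instructions: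
--         s += e
--         sums.append(s)
--     return sum(1 for v in sums if v % 100 == 0)
-- ===== Notes on version B (the rewrite author's own statement) =====
-- stated objective: faster
-- what changed: Replaces the per-step while-loop normalization (repeated +/-100 steps, up to |element|/100 iterations each) with plain running sums built in one pass and a separate counting pass using a single modulo (v % 100 == 0).
import Mathlib
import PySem

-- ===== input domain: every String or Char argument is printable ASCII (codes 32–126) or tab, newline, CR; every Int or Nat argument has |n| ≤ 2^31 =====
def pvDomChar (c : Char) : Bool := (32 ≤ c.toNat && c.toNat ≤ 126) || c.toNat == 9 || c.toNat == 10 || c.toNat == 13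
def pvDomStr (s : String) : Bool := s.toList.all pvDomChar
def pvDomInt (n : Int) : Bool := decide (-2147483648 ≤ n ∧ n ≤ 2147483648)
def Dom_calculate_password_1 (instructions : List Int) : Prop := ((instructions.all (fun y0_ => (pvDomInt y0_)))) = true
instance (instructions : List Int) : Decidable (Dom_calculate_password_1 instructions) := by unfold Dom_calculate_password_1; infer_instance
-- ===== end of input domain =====

-- B replaces A's per-step while-loop normalization by plain running sums and one counting pass with a single modulo (simpler decomposition).

-- ===== PORT A =====
-- 'while safe_value < 0: safe_value += 100'
def pvNormUp (v : Int) : Int :=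
  if v < 0 then pvNormUp (v + 100) else v
termination_by (-v).toNat
decreasing_by omega

-- 'while safe_value > 99: safe_value -= 100'
def pvNormDown (v : Int) : Int :=
  if v > 99 then pvNormDown (v - 100) else v
termination_by v.toNat
decreasing_by omega

def pvALoop : List Int → Int → Int → Int
  | [], _, password => password
  | e :: rest, safe, password =>
    let s := pvNormDown (pvNormUp (safe + e))
    pvALoop rest s (if s = 0 then password + 1 else password)

def calculate_password_1 (instructions : List Int) : Int :=
  pvALoop instructions 50 0

-- ===== PORT B =====
def calculate_password_1_alt (instructions : List Int) : Int :=
  let st := instructions.foldl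
    (fun (acc : List Int × Int) e =>
      let s := acc.2 + e
      (acc.1 ++ [s], s)) ([50], 50)
  ((st.1.countP (fun v => PySem.Int.mod v 100 == 0) : Nat) : Int)

-- ===== PRECONDITION & SPEC =====
def Spec_calculate_password_1 (instructions : List Int) (out : Int) : Prop := out = calculate_password_1_alt instructions
instance (instructions : List Int) (out : Int) : Decidable (Spec_calculate_password_1 instructions out) := by unfold Spec_calculate_password_1; infer_instance

-- ===== CLAIM (what is proved, stated in full; the proofs are below) =====
def Claim_equal_calculate_password_1 : Prop := ∀ (instructions : List Int), Dom_calculate_password_1 instructions → Spec_calculate_password_1 instructions (calculate_password_1 instructions)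

-- ===== LEMMAS AND PROOFS =====

-- the running sums after the seed, as a plain recursion (proof helper)
def pvScan : List Int → Int → List Int
  | [], _ => []
  | e :: rest, c => (c + e) :: pvScan rest (c + e)

lemma pvNormUp_spec (v : Int) : 0 ≤ pvNormUp v ∧ pvNormUp v % 100 = v % 100 := by
  fun_induction pvNormUp v with
  | case1 v h ih => omega
  | case2 v h => omega

lemma pvNormDown_spec (v : Int) (hv : 0 ≤ v) :
    0 ≤ pvNormDown v ∧ pvNormDown v ≤ 99 ∧ pvNormDown v % 100 = v % 100 := by
  fun_induction pvNormDown v with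
  | case1 v h ih =>
    have := ih (by omega)
    omega
  | case2 v h => omega

lemma pvNorm_eq (v : Int) : pvNormDown (pvNormUp v) = v % 100 := by
  obtain ⟨h1, h2⟩ := pvNormUp_spec v
  obtain ⟨h3, h4, h5⟩ := pvNormDown_spec (pvNormUp v) h1
  have hlt : pvNormDown (pvNormUp v) % 100 = pvNormDown (pvNormUp v) :=
    Int.emod_eq_of_lt h3 (by omega)
  omega

lemma pvALoop_eq (l : List Int) : ∀ (c p : Int),
    pvALoop l (c % 100) p = p + ((pvScan l c).countP (fun v => v % 100 == 0) : Int) := by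
  induction l with
  | nil => intro c p; simp [pvALoop, pvScan]
  | cons e rest ih =>
    intro c p
    have hmod : (c % 100 + e) % 100 = (c + e) % 100 := Int.emod_add_emod c 100 e
    simp only [pvALoop, pvNorm_eq, hmod, pvScan, List.countP_cons]
    rw [ih (c + e)]
    by_cases hz : (c + e) % 100 = 0
    · simp [hz]; omega
    · simp [hz]

lemma pvFoldl_scan (l : List Int) : ∀ (acc : List Int) (c : Int),
    l.foldl (fun (acc : List Int × Int) e =>
      let s := acc.2 + e
      (acc.1 ++ [s], s)) (acc, c) = (acc ++ pvScan l c, c + (l.sum)) := by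
  induction l with
  | nil => intro acc c; simp [pvScan]
  | cons e rest ih =>
    intro acc c
    simp only [List.foldl_cons, pvScan, ih, List.append_assoc, List.sum_cons]
    simp [add_assoc]

-- ===== VERDICT (by name: the statement is the Claim_ definition above) =====
theorem calculate_password_1_spec : Claim_equal_calculate_password_1 := by
  intro instructions _
  unfold Spec_calculate_password_1 calculate_password_1 calculate_password_1_alt
  rw [pvFoldl_scan]
  have h50 : (50 : Int) = 50 % 100 := by decide
  conv_lhs => rw [h50]
  rw [pvALoop_eq]
  simp
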